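-- pv_equiv track=rewrite | github.com/limaopereira/IST-PROJECTS | 1ANO/FP/Projeto2/projeto2.py | obter_vetor
-- ===== SOURCE A (Python) =====
-- def obter_vetor(tab,string):
--     #tabuleiro x string -> tuplo de pecas
--     '''
--     Recebe um tabuleiro e uma cadeia de carateres, e devolve todas as pecas da
--     linha ou coluna do tabuleiro, especificadas pela cadeia de carateres.
--     '''
--     colunas=['a','b','c']
--     linhas=['1','2','3']
--     res=()
--     if string in colunas:
--         ic=colunas.index(string)
--         for i in range(len(linhas)):
--             res=res+(tab[i][ic],)
--     elif string in linhas: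
--         il=linhas.index(string)
--         res=tuple(tab[il])
--     return res
-- ===== SOURCE B (Python) =====
-- def obter_vetor(tab, string):
--     # Idiomatic: build the column-major view once with zip and slice it,
--     # instead of appending tab[i][ic] element by element.
--     colunas = ['a', 'b', 'c']
--     linhas = ['1', '2', '3']
--     if string in colunas:
--         cols = list(zip(*tab[:3]))
--         return cols[colunas.index(string)]
--     if string in linhas:
--         return tuple(tab[linhas.index(string)])
--     return ()
-- ===== Notes on version B (the rewrite author's own statement) =====
-- stated objective: idiomatic
-- what changed: B builds the column-major view once with zip(*tab[:3]) and returns the requested column as a slice of that table, instead of A's loop over row indices appending tab[i][ic] one element at a time.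
import Mathlib
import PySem

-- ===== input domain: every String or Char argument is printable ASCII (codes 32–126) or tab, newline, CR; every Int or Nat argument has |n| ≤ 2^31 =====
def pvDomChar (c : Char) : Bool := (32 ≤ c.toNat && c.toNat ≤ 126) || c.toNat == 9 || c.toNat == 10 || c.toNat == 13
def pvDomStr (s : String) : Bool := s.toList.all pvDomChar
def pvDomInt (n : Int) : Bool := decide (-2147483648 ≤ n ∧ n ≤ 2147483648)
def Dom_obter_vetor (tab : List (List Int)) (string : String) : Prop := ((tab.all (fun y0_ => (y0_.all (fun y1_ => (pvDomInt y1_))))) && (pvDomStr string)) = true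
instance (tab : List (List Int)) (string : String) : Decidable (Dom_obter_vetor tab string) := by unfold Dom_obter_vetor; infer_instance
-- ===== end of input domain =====

-- B builds the column-major view once (Python zip) and slices it; A appends tab[i][ic] one row at a time.
-- Equivalence proved on Pre_, exactly the inputs where A returns without raising IndexError.

-- ===== PORT A =====
def obter_vetor (tab : List (List Int)) (string : String) : List Int :=
  let colunas : List String := ["a", "b", "c"]
  let linhas : List String := ["1", "2", "3"]
  let res : List Int := []
  if colunas.contains string then
    let ic : Nat := (PySem.List.index? colunas string).getD 0
    (PySem.List.pyRange 0 (linhas.length : Int) 1).foldl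
      (fun res i => res ++ [PySem.List.pyGetD (PySem.List.pyGetD tab i []) (ic : Int) 0]) res
  else if linhas.contains string then
    let il : Nat := (PySem.List.index? linhas string).getD 0
    PySem.List.pyGetD tab ((il : Int)) []
  else res

-- ===== PORT B =====
-- list(zip(*ls)): Python's zip ported as the corresponding Lean function, a structural
-- min-length transpose (stops as soon as any row is exhausted) — exact for zip of lists.
def zipAux (r : List Int) (rs : List (List Int)) : List (List Int) :=
  match r with
  | [] => []
  | a :: as =>
    if rs.all (fun x => !x.isEmpty) then
      (a :: rs.map (fun x => x.headD 0)) :: zipAux as (rs.map List.tail)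
    else []

def zipCols (ls : List (List Int)) : List (List Int) :=
  match ls with
  | [] => []
  | r :: rs => zipAux r rs

def obter_vetor_alt (tab : List (List Int)) (string : String) : List Int :=
  let colunas : List String := ["a", "b", "c"]
  let linhas : List String := ["1", "2", "3"]
  if colunas.contains string then
    let cols := zipCols (PySem.List.slice tab none (some 3))
    PySem.List.pyGetD cols (((PySem.List.index? colunas string).getD 0 : Nat) : Int) []
  else if linhas.contains string then
    PySem.List.pyGetD tab (((PySem.List.index? linhas string).getD 0 : Nat) : Int) []
  else []

-- ===== PRECONDITION & SPEC =====
-- Pre_ excludes exactly the inputs where A raises IndexError (column label with fewer than 3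
-- rows or a too-short row among the first 3; row label 'k' with fewer than k rows).
def Pre_obter_vetor (tab : List (List Int)) (string : String) : Prop :=
  (string = "a" → 3 ≤ tab.length ∧ ∀ r ∈ tab.take 3, 1 ≤ r.length) ∧
  (string = "b" → 3 ≤ tab.length ∧ ∀ r ∈ tab.take 3, 2 ≤ r.length) ∧
  (string = "c" → 3 ≤ tab.length ∧ ∀ r ∈ tab.take 3, 3 ≤ r.length) ∧
  (string = "1" → 1 ≤ tab.length) ∧
  (string = "2" → 2 ≤ tab.length) ∧
  (string = "3" → 3 ≤ tab.length)
instance (tab : List (List Int)) (string : String) : Decidable (Pre_obter_vetor tab string) := by unfold Pre_obter_vetor; infer_instance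
def pvWitness_obter_vetor : List (List Int) × String := ([[1,2,3],[4,5,6],[7,8,9]], "b")

def Spec_obter_vetor (tab : List (List Int)) (string : String) (out : List Int) : Prop := out = obter_vetor_alt tab string
instance (tab : List (List Int)) (string : String) (out : List Int) : Decidable (Spec_obter_vetor tab string out) := by unfold Spec_obter_vetor; infer_instance

-- ===== CLAIM (what is proved, stated in full; the proofs are below) =====
def Claim_equal_obter_vetor : Prop := ∀ (tab : List (List Int)) (string : String), Dom_obter_vetor tab string → Pre_obter_vetor tab string → Spec_obter_vetor tab string (obter_vetor tab string)

-- ===== LEMMAS AND PROOFS =====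

-- the ic-th entry of zip(*rows) is the ic-th entry of every row, when every row is long enough
theorem zipAux_getD (ic : Nat) (r : List Int) (rs : List (List Int)) (hr : ic < r.length)
    (hrs : ∀ x ∈ rs, ic < x.length) :
    (zipAux r rs).getD ic [] = r.getD ic 0 :: rs.map (fun x => x.getD ic 0) := by
  induction ic generalizing r rs with
  | zero =>
    match r with
    | a :: as =>
      rw [zipAux, if_pos (by
        simp only [List.all_eq_true, Bool.not_eq_eq_eq_not]
        intro x hx; have := hrs x hx; cases x <;> simp_all)]
      simp only [List.getD_cons_zero]
      congr 1
      apply List.map_congr_left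
      intro x _; cases x <;> simp
  | succ n ih =>
    match r with
    | a :: as =>
      rw [zipAux, if_pos (by
        simp only [List.all_eq_true, Bool.not_eq_eq_eq_not]
        intro x hx; have := hrs x hx; cases x <;> simp_all)]
      simp only [List.getD_cons_succ]
      rw [ih as (rs.map List.tail) (by simpa using hr)
        (by intro x hx
            obtain ⟨x', hx', rfl⟩ := List.mem_map.mp hx
            have := hrs x' hx'
            cases x' <;> simp_all)]
      rw [List.map_map]
      congr 1
      apply List.map_congr_left
      intro x hx
      have := hrs x hx
      cases x with
      | nil => simp at this
      | cons b t => simp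

theorem obter_vetor_col (tab : List (List Int)) (ic : Nat)     (h3 : 3 ≤ tab.length) (hlen : ∀ r ∈ tab.take 3, ic < r.length) :
    (PySem.List.pyRange 0 (3 : Int) 1).foldl
      (fun res i => res ++ [PySem.List.pyGetD (PySem.List.pyGetD tab i []) (ic : Int) 0]) [] =
    PySem.List.pyGetD (zipCols (PySem.List.slice tab none (some 3))) ((ic : Int)) [] := by
  obtain ⟨r0, r1, r2, rest, rfl⟩ : ∃ r0 r1 r2 rest, tab = r0 :: r1 :: r2 :: rest := by
    match tab, h3 with
    | r0 :: r1 :: r2 :: rest, _ => exact ⟨r0, r1, r2, rest, rfl⟩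
  have hsl : PySem.List.slice (r0 :: r1 :: r2 :: rest) none (some 3) = [r0, r1, r2] := by
    rw [show ((3 : Int) = ((3 : Nat) : Int)) by norm_num, PySem.List.slice_to_natCast]
    rfl
  rw [hsl]
  have hz : (zipCols [r0, r1, r2]).getD ic [] =
      [r0.getD ic 0, r1.getD ic 0, r2.getD ic 0] := by
    show (zipAux r0 [r1, r2]).getD ic [] = _
    rw [zipAux_getD ic r0 [r1, r2] (by apply hlen; simp)
      (by intro x hx; apply hlen; simp at hx; rcases hx with rfl | rfl <;> simp)]
    rfl
  have hpr : PySem.List.pyRange 0 (3 : Int) 1 = [0, 1, 2] := by decide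
  rw [hpr]
  simp only [List.foldl_cons, List.foldl_nil, List.nil_append]
  simp only [pysem, PySem.List.pyGetD_natCast]
  simp only [List.getD_eq_getElem?_getD] at hz
  exact hz.symm

-- ===== VERDICT =====
theorem obter_vetor_spec : Claim_equal_obter_vetor := by
  intro tab string _ hpre
  obtain ⟨ha, hb, hc, h1, h2, h3⟩ := hpre
  unfold Spec_obter_vetor obter_vetor obter_vetor_alt
  by_cases ea : string = "a"
  · subst ea
    obtain ⟨hl, hr⟩ := ha rfl
    simp only [List.contains_cons, beq_self_eq_true, Bool.true_or, if_pos,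
      PySem.List.index?_cons_self, Option.getD_some, List.length_cons, List.length_nil]
    exact obter_vetor_col tab 0 hl hr
  · by_cases eb : string = "b"
    · subst eb
      obtain ⟨hl, hr⟩ := hb rfl
      have hcont : (["a", "b", "c"] : List String).contains "b" = true := by decide
      have hidx : (PySem.List.index? (["a", "b", "c"] : List String) "b").getD 0 = 1 := by decide
      simp only [hcont, if_pos, hidx, List.length_cons, List.length_nil]
      exact obter_vetor_col tab 1 hl hr
    · by_cases ec : string = "c"
      · subst ec
        obtain ⟨hl, hr⟩ := hc rfl
        have hcont : (["a", "b", "c"] : List String).contains "c" = true := by decide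
        have hidx : (PySem.List.index? (["a", "b", "c"] : List String) "c").getD 0 = 2 := by decide
        simp only [hcont, if_pos, hidx, List.length_cons, List.length_nil]
        exact obter_vetor_col tab 2 hl hr
      · -- string is not a column label
        have hnc : (["a", "b", "c"] : List String).contains string = false := by
          simp only [List.contains_cons, List.contains_nil, Bool.or_false,
            Bool.or_eq_false_iff, beq_eq_false_iff_ne, ne_eq]
          exact ⟨ea, eb, ec⟩
        -- the elif/else part of A is syntactically the same expression in B
        simp only [hnc, Bool.false_eq_true, if_false]
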